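-- pv_equiv track=rewrite | github.com/shilatorkaby/Reddit-Data-Automation | src/profanity_detector.py | detect_bad_words
-- ===== SOURCE A (Python) =====
-- import string
-- from typing import List, Set, Tuple, Optional
--
-- def detect_bad_words(text: str, bad_words: Set[str]) -> List[str]:
--     """
--     Return a list of distinct bad words found in the given text.
--     """
--     if not text:
--         return []
--
--     text = text.lower()
--     # sting.punctuation = r"""!"#$%&'()*+,-./:;<=>?@[\]^_`{|}~"""
--     for p in string.punctuation:
--         text = text.replace(p, " ")
--
--     tokens = text.split()
--     matched = {t for t in tokens if t in bad_words}
--     return sorted(matched)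
-- ===== SOURCE B (Python) =====
-- import string
--
-- def detect_bad_words(text, bad_words):
--     # single left-to-right scan: build each token char by char, flush at delimiters
--     found = set()
--     cur = []
--     for ch in text.lower():
--         if ch in string.punctuation or ch.isspace():
--             if cur:
--                 tok = ''.join(cur)
--                 if tok in bad_words:
--                     found.add(tok)
--                 cur = []
--         else:
--             cur.append(ch)
--     if cur:
--         tok = ''.join(cur)
--         if tok in bad_words:
--             found.add(tok)
--     return sorted(found)
-- ===== Notes on version B (the rewrite author's own statement) =====
-- stated objective: alternative
-- what changed: B replaces A's staged pipeline (32 punctuation-replace passes, then split, then set-comprehension over tokens) by a single left-to-right character scan: a state machine accumulates the current token and flushes it into the result set at each delimiter, so the text is traversed once and no intermediate normalized string or token list is built.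
import Mathlib
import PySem

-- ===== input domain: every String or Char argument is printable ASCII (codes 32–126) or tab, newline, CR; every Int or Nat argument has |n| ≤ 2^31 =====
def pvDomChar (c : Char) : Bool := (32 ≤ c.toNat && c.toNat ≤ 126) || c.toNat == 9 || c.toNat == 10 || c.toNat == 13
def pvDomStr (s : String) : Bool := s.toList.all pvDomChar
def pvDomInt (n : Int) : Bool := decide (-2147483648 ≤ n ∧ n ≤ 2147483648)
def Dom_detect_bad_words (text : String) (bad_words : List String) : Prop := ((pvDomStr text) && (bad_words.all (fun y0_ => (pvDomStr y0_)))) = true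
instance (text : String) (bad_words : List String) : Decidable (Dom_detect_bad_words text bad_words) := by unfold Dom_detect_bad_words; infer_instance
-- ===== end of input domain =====

-- B is a single-pass streaming tokenizer (accumulate current token, flush at each delimiter
-- into the result set) instead of A's staged replace-all-punctuation / split / intersect; objective: alternative.

-- string.punctuation
def pvPunct : List Char := "!\"#$%&'()*+,-./:;<=>?@[\\]^_`{|}~".toList

-- ===== PORT A =====
def detect_bad_words (text : String) (bad_words : List String) : List String :=
  if text = "" then []
  else
    let t := PySem.Str.lower text
    let t := pvPunct.foldl (fun s p => PySem.Str.replace s (String.ofList [p]) " ") t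
    let tokens := PySem.Str.split₀ t
    let matched := PySem.Set.ofList (tokens.filter (fun tk => bad_words.contains tk))
    PySem.List.sorted matched (fun s => s.toList)

-- ===== PORT B =====
-- delimiter test: `ch in string.punctuation or ch.isspace()`
def pvDelim (c : Char) : Bool := pvPunct.contains c || PySem.Chars.isspace c

-- flush the current token (held reversed, as Python's append-built list) into the found set
def pvFlush (bad : List String) (found : PySem.Set String) (cur : List Char) : PySem.Set String :=
  if cur.isEmpty then found
  else
    let tok := String.ofList cur.reverse
    if bad.contains tok then found.add tok else found

-- the character loop of B
def pvScan (bad : List String) : List Char → List Char → PySem.Set String → PySem.Set String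
  | [], cur, found => pvFlush bad found cur
  | c :: rest, cur, found =>
      if pvDelim c then pvScan bad rest [] (pvFlush bad found cur)
      else pvScan bad rest (c :: cur) found

def detect_bad_words_alt (text : String) (bad_words : List String) : List String :=
  PySem.List.sorted (pvScan bad_words (PySem.Str.lower text).toList [] (PySem.Set.ofList []))
    (fun s => s.toList)

-- ===== PRECONDITION & SPEC =====
def Spec_detect_bad_words (text : String) (bad_words : List String) (out : List String) : Prop := out = detect_bad_words_alt text bad_words
instance (text : String) (bad_words : List String) (out : List String) : Decidable (Spec_detect_bad_words text bad_words out) := by unfold Spec_detect_bad_words; infer_instance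

-- ===== CLAIM =====
def Claim_equal_detect_bad_words : Prop := ∀ (text : String) (bad_words : List String), Dom_detect_bad_words text bad_words → Spec_detect_bad_words text bad_words (detect_bad_words text bad_words)

-- ===== LEMMAS AND PROOFS =====

def pvNorm (c : Char) : Char := if pvPunct.contains c then ' ' else c

-- replace.go on a one-char pattern is a pointwise substitution
lemma pv_go_single (p : Char) : ∀ (fuel : Nat) (l acc : List Char), l.length ≤ fuel →
    PySem.Chars.replace.go [p] [' '] fuel l acc
      = acc.reverse ++ l.map (fun c => if c = p then ' ' else c) := by
  intro fuel
  induction fuel with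
  | zero =>
    intro l acc h
    cases l with
    | nil => simp [PySem.Chars.replace.go]
    | cons c t => simp at h
  | succ n ih =>
    intro l acc h
    cases l with
    | nil => simp [PySem.Chars.replace.go]
    | cons c t =>
      rw [PySem.Chars.replace.go]
      by_cases hc : c = p
      · subst hc
        simp [List.isPrefixOf, ih t (' ' :: acc) (by simpa using h)]
      · have hpre : [p].isPrefixOf (c :: t) = false := by
          simp [List.isPrefixOf]; exact fun h' => absurd h'.symm hc
        simp [hpre, hc, ih t (c :: acc) (by simpa using h)]

lemma pv_replace_single (p : Char) (l : List Char) :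
    PySem.Chars.replace l [p] [' '] = l.map (fun c => if c = p then ' ' else c) := by
  rw [PySem.Chars.replace]
  simp [pv_go_single p l.length l [] le_rfl]

-- folding single-char replaces over a space-free char list is one pointwise substitution
lemma pv_fold_replace (ps : List Char) (hsp : ' ' ∉ ps) : ∀ (s : String),
    (ps.foldl (fun t p => PySem.Str.replace t (String.ofList [p]) " ") s).toList
      = s.toList.map (fun c => if ps.contains c then ' ' else c) := by
  induction ps with
  | nil => intro s; simp
  | cons p ps ih =>
    intro s
    have hsp' : ' ' ∉ ps := fun h => hsp (List.mem_cons_of_mem _ h)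
    have hps : (' ' ∈ ps) = False := by simp [hsp']
    rw [List.foldl_cons, ih hsp']
    have hrep : (PySem.Str.replace s (String.ofList [p]) " ").toList
        = s.toList.map (fun c => if c = p then ' ' else c) := by
      rw [PySem.Str.toList_replace]
      simp [pv_replace_single]
    rw [hrep, List.map_map]
    apply List.map_congr_left
    intro c _
    by_cases hc : c = p
    · subst hc
      simp [hps]
    · simp [hc]

-- A's normalized text, character-wise
lemma pv_norm_eq (text : String) :
    (pvPunct.foldl (fun s p => PySem.Str.replace s (String.ofList [p]) " ") (PySem.Str.lower text)).toList
      = (PySem.Str.lower text).toList.map pvNorm := by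
  rw [pv_fold_replace pvPunct (by decide) (PySem.Str.lower text)]
  rfl

-- delimiters of B are exactly the whitespace of A's normalized text
lemma pv_delim_norm (c : Char) : PySem.Chars.isspace (pvNorm c) = pvDelim c := by
  unfold pvNorm pvDelim
  cases hc : pvPunct.contains c <;> simp [hc] <;> decide

-- the accumulator of split₀.go factors out
lemma pv_split_go_acc : ∀ (l cur : List Char) (acc : List (List Char)),
    PySem.Chars.split₀.go l cur acc = acc.reverse ++ PySem.Chars.split₀.go l cur [] := by
  intro l
  induction l with
  | nil =>
    intro cur acc
    by_cases h : cur.isEmpty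
    · simp [PySem.Chars.split₀.go, h]
    · simp [PySem.Chars.split₀.go, h]
  | cons c rest ih =>
    intro cur acc
    by_cases hs : PySem.Chars.isspace c
    · by_cases h : cur.isEmpty
      · simp only [PySem.Chars.split₀.go, hs, h, if_true]
        exact ih [] acc
      · simp only [PySem.Chars.split₀.go, hs, h, if_true, if_false, Bool.false_eq_true]
        rw [ih [] (cur.reverse :: acc), ih [] [cur.reverse]]
        simp
    · simp only [PySem.Chars.split₀.go, hs, Bool.false_eq_true, if_false]
      rw [ih (c :: cur) acc]

-- one token step of the found-set fold
def pvStep (bad : List String) (s : PySem.Set String) (t : List Char) : PySem.Set String :=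
  if bad.contains (String.ofList t) then s.add (String.ofList t) else s

-- B's scan folds pvStep over the tokens of the normalized character list
lemma pv_scan_eq (bad : List String) : ∀ (l cur : List Char) (found : PySem.Set String),
    pvScan bad l cur found
      = (PySem.Chars.split₀.go (l.map pvNorm) cur []).foldl (pvStep bad) found := by
  intro l
  induction l with
  | nil =>
    intro cur found
    by_cases h : cur.isEmpty
    · simp [pvScan, pvFlush, PySem.Chars.split₀.go, h]
    · simp [pvScan, pvFlush, PySem.Chars.split₀.go, h, pvStep]
  | cons c rest ih =>
    intro cur found
    by_cases hd : pvDelim c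
    · have hs : PySem.Chars.isspace (pvNorm c) = true := by rw [pv_delim_norm, hd]
      by_cases h : cur.isEmpty
      · have hcur : cur = [] := by cases cur <;> simp_all
        simp only [pvScan, hd, List.map_cons, PySem.Chars.split₀.go, hs, h, if_true]
        rw [ih, hcur]
        simp [pvFlush]
      · simp only [pvScan, hd, List.map_cons, PySem.Chars.split₀.go, hs, h, if_true,
          Bool.false_eq_true, if_false]
        rw [pv_split_go_acc _ [] [cur.reverse], ih]
        simp [pvFlush, h, pvStep]
    · have hd' : pvDelim c = false := by
        cases h2 : pvDelim c
        · rfl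
        · exact absurd h2 hd
      have h2 : (pvPunct.contains c || PySem.Chars.isspace c) = false := hd'
      have hcc : pvPunct.contains c = false := (Bool.or_eq_false_iff.mp h2).1
      have hsc : PySem.Chars.isspace c = false := (Bool.or_eq_false_iff.mp h2).2
      have hn : pvNorm c = c := by
        unfold pvNorm
        simp only [hcc, Bool.false_eq_true, if_false]
      simp only [pvScan, hd', Bool.false_eq_true, if_false, List.map_cons,
        PySem.Chars.split₀.go, hn, hsc]
      rw [ih]

-- ofList of a filtered list is the filtered fold
lemma pv_ofList_filter (bad : List String) : ∀ (xs : List (List Char)) (s : PySem.Set String),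
    (xs.filter (fun t => bad.contains (String.ofList t))).foldl
        (fun s t => PySem.Set.add s (String.ofList t)) s
      = xs.foldl (pvStep bad) s := by
  intro xs
  induction xs with
  | nil => intro s; rfl
  | cons x rest ih =>
    intro s
    by_cases h : bad.contains (String.ofList x) = true
    · rw [List.filter_cons, if_pos h, List.foldl_cons, List.foldl_cons, ih]
      have hstep : pvStep bad s x = s.add (String.ofList x) := by
        unfold pvStep; rw [if_pos h]
      rw [hstep]
    · rw [List.filter_cons, if_neg h, List.foldl_cons, ih]
      have hstep : pvStep bad s x = s := by
        unfold pvStep; rw [if_neg h]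
      rw [hstep]

theorem detect_bad_words_spec : Claim_equal_detect_bad_words := by
  intro text bad_words _
  unfold Spec_detect_bad_words
  by_cases he : text = ""
  · subst he
    have h0 : (PySem.Str.lower "").toList = [] := by decide
    unfold detect_bad_words detect_bad_words_alt
    rw [if_pos rfl, h0]
    rfl
  · simp only [detect_bad_words, detect_bad_words_alt, if_neg he]
    rw [pv_scan_eq]
    -- A's matched set equals B's found set, as lists
    have htok : PySem.Str.split₀
        (pvPunct.foldl (fun s p => PySem.Str.replace s (String.ofList [p]) " ")
          (PySem.Str.lower text))
        = (PySem.Chars.split₀ ((PySem.Str.lower text).toList.map pvNorm)).map String.ofList := by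
      have h := PySem.Str.split₀_map_toList
        (pvPunct.foldl (fun s p => PySem.Str.replace s (String.ofList [p]) " ")
          (PySem.Str.lower text))
      rw [pv_norm_eq] at h
      have h2 := congrArg (List.map String.ofList) h
      simpa [List.map_map, Function.comp_def] using h2
    rw [htok, List.filter_map]
    unfold PySem.Chars.split₀ PySem.Set.ofList
    rw [List.foldl_map]
    simp only [Function.comp_def]
    rw [pv_ofList_filter bad_words]
    rfl
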